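-- pv_equiv track=rewrite | github.com/Bestehorn/LLMManager | test/integration/test_integration_notebook_token_display.py | _select_preferred_region_from_available
-- ===== SOURCE A (Python) =====
-- from typing import Any, Dict, List, Optional, Tuple
--
-- PREFERRED_TEST_REGIONS = ["us-east-1", "us-west-2"]
--
-- FALLBACK_TEST_REGIONS = ["eu-west-1", "ap-southeast-1"]
--
-- def _select_preferred_region_from_available(available_regions: List[str]) -> Optional[str]:
--     """
--     Select the most preferred region from available regions for testing.
--
--     Args:
--         available_regions: List of regions where the model is available
--
--     Returns:
--         Preferred region if available, None if no regions available
--     """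
--     if not available_regions:
--         return None
--
--     # Try preferred regions first
--     for preferred_region in PREFERRED_TEST_REGIONS:
--         if preferred_region in available_regions:
--             return preferred_region
--
--     # Try fallback regions
--     for fallback_region in FALLBACK_TEST_REGIONS:
--         if fallback_region in available_regions:
--             return fallback_region
--
--     # If no preferred regions available, use first available region
--     return available_regions[0]
-- ===== SOURCE B (Python) =====
-- from typing import List, Optional
--
-- _REGION_RANK = {"us-east-1": 0, "us-west-2": 1, "eu-west-1": 2, "ap-southeast-1": 3}
--
--
-- def _select_preferred_region_from_available(available_regions: List[str]) -> Optional[str]: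
--     if not available_regions:
--         return None
--     # Single pass over the available regions: pick the one with the smallest
--     # preference rank; unknown regions rank 4, and min's first-wins rule makes
--     # the first available region win when nothing preferred/fallback is present.
--     return min(available_regions, key=lambda r: _REGION_RANK.get(r, 4))
-- ===== Notes on version B (the rewrite author's own statement) =====
-- stated objective: alternative
-- what changed: Replaces the two sequential membership scans over the constant preference lists by a single pass over available_regions selecting the minimum-rank region via a rank table (min with key, first-min-wins).
import Mathlib
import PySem

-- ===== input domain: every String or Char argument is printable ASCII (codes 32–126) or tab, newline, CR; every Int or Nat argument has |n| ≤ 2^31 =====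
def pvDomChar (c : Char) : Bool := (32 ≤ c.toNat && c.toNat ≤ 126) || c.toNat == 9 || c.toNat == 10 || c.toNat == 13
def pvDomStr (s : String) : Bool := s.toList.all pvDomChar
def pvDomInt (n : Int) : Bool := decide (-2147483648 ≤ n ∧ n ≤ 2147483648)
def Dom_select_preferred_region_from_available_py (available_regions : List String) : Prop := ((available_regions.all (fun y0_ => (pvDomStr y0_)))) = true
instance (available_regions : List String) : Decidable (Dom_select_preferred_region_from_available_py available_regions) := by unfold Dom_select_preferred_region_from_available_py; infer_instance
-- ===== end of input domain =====

-- B replaces A's two membership scans over the constant preference lists by one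
-- pass selecting the minimum-rank available region (objective: alternative).

-- ===== PORT A =====
def pvPreferredTestRegions : List String := ["us-east-1", "us-west-2"]

def pvFallbackTestRegions : List String := ["eu-west-1", "ap-southeast-1"]

-- 'for r in cands: if r in ar: return r' — first candidate contained in ar
def pvFirstIn (cands : List String) (ar : List String) : Option String :=
  match cands with
  | [] => none
  | c :: rest => if ar.contains c then some c else pvFirstIn rest ar

def select_preferred_region_from_available_py (available_regions : List String) : Option String :=
  if available_regions = [] then none
  else
    match pvFirstIn pvPreferredTestRegions available_regions with
    | some r => some r
    | none =>
      match pvFirstIn pvFallbackTestRegions available_regions with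
      | some r => some r
      | none => PySem.List.pyGet? available_regions 0

-- ===== PORT B =====
def pvRegionRank : PySem.Dict String Int :=
  PySem.Dict.ofList [("us-east-1", 0), ("us-west-2", 1), ("eu-west-1", 2), ("ap-southeast-1", 3)]

def select_preferred_region_from_available_py_alt (available_regions : List String) : Option String :=
  if available_regions = [] then none
  else PySem.List.min? available_regions (fun r => PySem.Dict.getD pvRegionRank r 4)

-- ===== PRECONDITION & SPEC =====
def Spec_select_preferred_region_from_available_py (available_regions : List String) (out : Option String) : Prop := out = select_preferred_region_from_available_py_alt available_regions
instance (available_regions : List String) (out : Option String) : Decidable (Spec_select_preferred_region_from_available_py available_regions out) := by unfold Spec_select_preferred_region_from_available_py; infer_instance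

-- ===== CLAIM (what is proved, stated in full; the proofs are below) =====
def Claim_equal_select_preferred_region_from_available_py : Prop := ∀ (available_regions : List String), Dom_select_preferred_region_from_available_py available_regions → Spec_select_preferred_region_from_available_py available_regions (select_preferred_region_from_available_py available_regions)

-- ===== LEMMAS AND PROOFS =====

-- the rank key B uses, written out as an if-chain
def pvRank (r : String) : Int :=
  PySem.Dict.getD pvRegionRank r 4

theorem pvRank_eq (r : String) :
    pvRank r = if r = "us-east-1" then 0 else if r = "us-west-2" then 1
      else if r = "eu-west-1" then 2 else if r = "ap-southeast-1" then 3 else 4 := by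
  have h : pvRegionRank.items =
      [("us-east-1", 0), ("us-west-2", 1), ("eu-west-1", 2), ("ap-southeast-1", 3)] := by decide
  unfold pvRank
  by_cases e1 : r = "us-east-1"
  · subst e1; decide
  by_cases e2 : r = "us-west-2"
  · subst e2; decide
  by_cases e3 : r = "eu-west-1"
  · subst e3; decide
  by_cases e4 : r = "ap-southeast-1"
  · subst e4; decide
  have f1 : ("us-east-1" == r) = false := beq_eq_false_iff_ne.mpr (Ne.symm e1)
  have f2 : ("us-west-2" == r) = false := beq_eq_false_iff_ne.mpr (Ne.symm e2)
  have f3 : ("eu-west-1" == r) = false := beq_eq_false_iff_ne.mpr (Ne.symm e3)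
  have f4 : ("ap-southeast-1" == r) = false := beq_eq_false_iff_ne.mpr (Ne.symm e4)
  simp [PySem.Dict.getD, PySem.Dict.get?, h, List.find?, f1, f2, f3, f4, e1, e2, e3, e4]

-- the fold inside PySem.List.min?
def pvMinStep (acc : Option String) (x : String) : Option String :=
  match acc with
  | none => some x
  | some m => if pvRank x < pvRank m then some x else some m

theorem min?_eq_fold (ar : List String) :
    PySem.List.min? ar (fun r => PySem.Dict.getD pvRegionRank r 4) = ar.foldl pvMinStep none := by
  unfold PySem.List.min?
  congr 1
  funext acc x
  cases acc <;> rfl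

theorem fold_keep (t : List String) (m : String)
    (h : ∀ x ∈ t, ¬ pvRank x < pvRank m) : t.foldl pvMinStep (some m) = some m := by
  induction t with
  | nil => rfl
  | cons x t ih =>
    have hx := h x (by simp)
    simp [List.foldl_cons, pvMinStep, hx]
    exact ih fun y hy => h y (List.mem_cons_of_mem _ hy)

theorem fold_pick (t : List String) (m r : String)
    (hlt : pvRank r < pvRank m) (hmem : r ∈ t)
    (hmin : ∀ x ∈ t, pvRank r ≤ pvRank x)
    (hinj : ∀ x ∈ t, pvRank x = pvRank r → x = r) :
    t.foldl pvMinStep (some m) = some r := by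
  induction t generalizing m with
  | nil => cases hmem
  | cons x t ih =>
    by_cases hx : pvRank x < pvRank m
    · simp [List.foldl_cons, pvMinStep, hx]
      by_cases hxr : x = r
      · subst hxr
        exact fold_keep t x fun y hy => not_lt.mpr (hmin y (List.mem_cons_of_mem _ hy))
      · have hxlt : pvRank r < pvRank x := by
          rcases lt_or_eq_of_le (hmin x (by simp)) with h' | h'
          · exact h'
          · exact absurd (hinj x (by simp) h'.symm) hxr
        have hmem' : r ∈ t := by
          rcases List.mem_cons.mp hmem with h' | h'
          · exact absurd h'.symm hxr
          · exact h'
        exact ih x hxlt hmem' (fun y hy => hmin y (List.mem_cons_of_mem _ hy))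
          (fun y hy => hinj y (List.mem_cons_of_mem _ hy))
    · simp [List.foldl_cons, pvMinStep, hx]
      have hxr : x ≠ r := fun h' => hx (h' ▸ hlt)
      have hmem' : r ∈ t := by
        rcases List.mem_cons.mp hmem with h' | h'
        · exact absurd h'.symm hxr
        · exact h'
      exact ih m hlt hmem' (fun y hy => hmin y (List.mem_cons_of_mem _ hy))
        (fun y hy => hinj y (List.mem_cons_of_mem _ hy))

-- min? on a nonempty list returns the distinguished minimal-rank element r
theorem min?_pick (h : String) (t : List String) (r : String)
    (hmem : r ∈ h :: t)
    (hmin : ∀ x ∈ h :: t, pvRank r ≤ pvRank x)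
    (hinj : ∀ x ∈ h :: t, pvRank x = pvRank r → x = r) :
    PySem.List.min? (h :: t) (fun s => PySem.Dict.getD pvRegionRank s 4) = some r := by
  rw [min?_eq_fold]
  have hstep : (h :: t).foldl pvMinStep none = t.foldl pvMinStep (some h) := by
    simp [List.foldl_cons, pvMinStep]
  rw [hstep]
  by_cases hhr : h = r
  · subst hhr
    exact fold_keep t h fun y hy => not_lt.mpr (hmin y (List.mem_cons_of_mem _ hy))
  · have hlt : pvRank r < pvRank h := by
      rcases lt_or_eq_of_le (hmin h (by simp)) with h' | h'
      · exact h'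
      · exact absurd (hinj h (by simp) h'.symm) hhr
    have hmem' : r ∈ t := by
      rcases List.mem_cons.mp hmem with h' | h'
      · exact absurd h'.symm hhr
      · exact h'
    exact fold_pick t h r hlt hmem' (fun y hy => hmin y (List.mem_cons_of_mem _ hy))
      (fun y hy => hinj y (List.mem_cons_of_mem _ hy))

-- ===== VERDICT (by name: the statement is the Claim_ definition above) =====
theorem select_preferred_region_from_available_py_spec : Claim_equal_select_preferred_region_from_available_py := by
  intro ar _
  unfold Spec_select_preferred_region_from_available_py
  cases ar with
  | nil => rfl
  | cons h t =>
    unfold select_preferred_region_from_available_py select_preferred_region_from_available_py_alt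
    simp only [reduceCtorEq, if_false]
    by_cases h1 : "us-east-1" ∈ h :: t
    · rw [min?_pick h t "us-east-1" h1
        (fun x _ => by rw [pvRank_eq, pvRank_eq]; split_ifs <;> simp_all)
        (fun x _ hx => by rw [pvRank_eq, pvRank_eq] at hx; split_ifs at hx <;> simp_all)]
      simp [pvFirstIn, pvPreferredTestRegions, h1]
    · by_cases h2 : "us-west-2" ∈ h :: t
      · rw [min?_pick h t "us-west-2" h2
          (fun x hx => by
            have e1 : x ≠ "us-east-1" := fun he => h1 (he ▸ hx)
            rw [pvRank_eq, pvRank_eq]; split_ifs <;> simp_all)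
          (fun x _ hx => by rw [pvRank_eq, pvRank_eq] at hx; split_ifs at hx <;> simp_all)]
        simp [pvFirstIn, pvPreferredTestRegions, h1, h2]
      · by_cases h3 : "eu-west-1" ∈ h :: t
        · rw [min?_pick h t "eu-west-1" h3
            (fun x hx => by
              have e1 : x ≠ "us-east-1" := fun he => h1 (he ▸ hx)
              have e2 : x ≠ "us-west-2" := fun he => h2 (he ▸ hx)
              rw [pvRank_eq, pvRank_eq]; split_ifs <;> simp_all)
            (fun x _ hx => by rw [pvRank_eq, pvRank_eq] at hx; split_ifs at hx <;> simp_all)]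
          simp [pvFirstIn, pvPreferredTestRegions, pvFallbackTestRegions, h1, h2, h3]
        · by_cases h4 : "ap-southeast-1" ∈ h :: t
          · rw [min?_pick h t "ap-southeast-1" h4
              (fun x hx => by
                have e1 : x ≠ "us-east-1" := fun he => h1 (he ▸ hx)
                have e2 : x ≠ "us-west-2" := fun he => h2 (he ▸ hx)
                have e3 : x ≠ "eu-west-1" := fun he => h3 (he ▸ hx)
                rw [pvRank_eq, pvRank_eq]; split_ifs <;> simp_all)
              (fun x _ hx => by rw [pvRank_eq, pvRank_eq] at hx; split_ifs at hx <;> simp_all)]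
            simp [pvFirstIn, pvPreferredTestRegions, pvFallbackTestRegions, h1, h2, h3, h4]
          · have hfold : PySem.List.min? (h :: t) (fun s => PySem.Dict.getD pvRegionRank s 4) = some h := by
              rw [min?_eq_fold]
              have hstep : (h :: t).foldl pvMinStep none = t.foldl pvMinStep (some h) := by
                simp [List.foldl_cons, pvMinStep]
              rw [hstep]
              refine fold_keep t h fun x hx => ?_
              have hx' : x ∈ h :: t := List.mem_cons_of_mem _ hx
              have e1 : x ≠ "us-east-1" := fun he => h1 (he ▸ hx')
              have e2 : x ≠ "us-west-2" := fun he => h2 (he ▸ hx')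
              have e3 : x ≠ "eu-west-1" := fun he => h3 (he ▸ hx')
              have e4 : x ≠ "ap-southeast-1" := fun he => h4 (he ▸ hx')
              rw [pvRank_eq, pvRank_eq]
              split_ifs <;> simp_all
            rw [hfold]
            simp [pvFirstIn, pvPreferredTestRegions, pvFallbackTestRegions, h1, h2, h3, h4,
              PySem.List.pyGet?, PySem.List.pyIdx?]
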